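-- pv_equiv track=rewrite | github.com/zBiTz/strix | strix/tools/waf_bypass_toolkit/waf_bypass_toolkit.py | _unicode_variants
-- ===== SOURCE A (Python) =====
-- def _unicode_variants(payload: str) -> list[str]:
--     """Generate Unicode variants."""
--     variants = []
--
--     # Full-width characters
--     fullwidth = ""
--     for char in payload:
--         if "a" <= char <= "z":
--             fullwidth += chr(ord(char) - ord("a") + 0xFF41)
--         elif "A" <= char <= "Z":
--             fullwidth += chr(ord(char) - ord("A") + 0xFF21)
--         elif "0" <= char <= "9":
--             fullwidth += chr(ord(char) - ord("0") + 0xFF10)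
--         else:
--             fullwidth += char
--     variants.append(fullwidth)
--
--     # Unicode escape
--     unicode_escaped = "".join(f"\\u{ord(c):04x}" for c in payload)
--     variants.append(unicode_escaped)
--
--     return variants
-- ===== SOURCE B (Python) =====
-- def _unicode_variants(payload: str) -> list[str]:
--     """Generate Unicode variants."""
--     # Fullwidth: every ASCII alphanumeric is the same distance 0xFEE0 from its
--     # fullwidth form, so one uniform shift replaces per-class offsets.
--     fullwidth = "".join(chr(ord(c) + 0xFEE0) if c.isalnum() else c for c in payload)
--     # Unicode escape: hex-dump the UTF-16-BE encoding of the whole string in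
--     # 2-byte groups and prefix each 4-digit group with \u.
--     groups = payload.encode("utf-16-be").hex(" ", 2).split()
--     unicode_escaped = "".join("\\u" + g for g in groups)
--     return [fullwidth, unicode_escaped]
-- ===== Notes on version B (the rewrite author's own statement) =====
-- stated objective: alternative
-- what changed: Fullwidth variant uses the single uniform offset 0xFEE0 on isalnum() characters instead of three class-specific offset branches, and the unicode-escape variant is produced by hex-dumping the UTF-16-BE encoding of the whole payload into space-separated 2-byte groups (bytes.hex with a separator, then split) and prefixing each 4-digit group with a backslash-u, instead of formatting each character with an f-string.
import Mathlib
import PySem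

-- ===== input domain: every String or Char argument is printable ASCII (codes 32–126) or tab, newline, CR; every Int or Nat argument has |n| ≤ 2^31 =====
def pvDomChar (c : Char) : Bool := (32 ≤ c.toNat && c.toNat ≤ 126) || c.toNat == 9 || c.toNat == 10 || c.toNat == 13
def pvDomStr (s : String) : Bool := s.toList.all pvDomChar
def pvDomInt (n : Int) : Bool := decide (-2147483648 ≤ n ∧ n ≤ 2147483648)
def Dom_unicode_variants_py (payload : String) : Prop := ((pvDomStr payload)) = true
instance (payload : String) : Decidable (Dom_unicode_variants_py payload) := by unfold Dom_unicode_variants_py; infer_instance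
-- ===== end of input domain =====

-- B derives the fullwidth variant by one uniform +0xFEE0 shift on alphanumerics and the
-- unicode-escape variant from a grouped hex dump of the UTF-16-BE encoding; same return value.

-- lowercase hex digit of n < 16 (used by A's f"{:04x}" and by B's bytes.hex); exact
def pvHexDigit (n : Nat) : Char := if n < 10 then Char.ofNat (48 + n) else Char.ofNat (87 + n)

-- ===== PORT A =====
-- f"\\u{ord(c):04x}" for codepoint n; exact for n ≤ 0xFFFF
def pvU4 (n : Nat) : List Char :=
  ['\\', 'u', pvHexDigit (n / 4096 % 16), pvHexDigit (n / 256 % 16), pvHexDigit (n / 16 % 16), pvHexDigit (n % 16)]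

def unicode_variants_py (payload : String) : List String :=
  let fullwidth : List Char := payload.toList.foldl (fun acc char =>
    if 97 ≤ char.toNat ∧ char.toNat ≤ 122 then acc ++ [Char.ofNat (char.toNat - 97 + 0xFF41)]
    else if 65 ≤ char.toNat ∧ char.toNat ≤ 90 then acc ++ [Char.ofNat (char.toNat - 65 + 0xFF21)]
    else if 48 ≤ char.toNat ∧ char.toNat ≤ 57 then acc ++ [Char.ofNat (char.toNat - 48 + 0xFF10)]
    else acc ++ [char]) []
  let unicode_escaped : List Char := (payload.toList.map (fun c => pvU4 c.toNat)).flatten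
  [String.ofList fullwidth, String.ofList unicode_escaped]

-- ===== PORT B =====
-- two lowercase hex digits of a byte b (bytes.hex); exact for b < 256
def pvByteHex (b : Nat) : List Char := [pvHexDigit (b / 16), pvHexDigit (b % 16)]

-- payload.encode("utf-16-be"): big-endian byte pair per code point; exact for BMP code points
def pvBytesUtf16be (l : List Char) : List Nat := l.flatMap (fun c => [c.toNat / 256, c.toNat % 256])

-- .hex(" ", 2).split(): hex digits of the bytes, two bytes (= 4 digits) per group
def pvHexGroups : List Nat → List (List Char)
  | b1 :: b2 :: rest => (pvByteHex b1 ++ pvByteHex b2) :: pvHexGroups rest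
  | [b] => [pvByteHex b]
  | [] => []

def unicode_variants_py_alt (payload : String) : List String :=
  let fullwidth : List Char := payload.toList.map (fun c =>
    if PySem.Chars.isalnum c then Char.ofNat (c.toNat + 0xFEE0) else c)
  let groups : List (List Char) := pvHexGroups (pvBytesUtf16be payload.toList)
  let unicode_escaped : List Char := (groups.map (fun g => '\\' :: 'u' :: g)).flatten
  [String.ofList fullwidth, String.ofList unicode_escaped]

-- ===== PRECONDITION & SPEC =====
def Spec_unicode_variants_py (payload : String) (out : List String) : Prop := out = unicode_variants_py_alt payload
instance (payload : String) (out : List String) : Decidable (Spec_unicode_variants_py payload out) := by unfold Spec_unicode_variants_py; infer_instance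

-- ===== CLAIM (what is proved, stated in full; the proofs are below) =====
def Claim_equal_unicode_variants_py : Prop := ∀ (payload : String), Dom_unicode_variants_py payload → Spec_unicode_variants_py payload (unicode_variants_py payload)

-- ===== LEMMAS AND PROOFS =====

theorem alnum_iff (c : Char) : PySem.Chars.isalnum c = true ↔
    ((97 ≤ c.toNat ∧ c.toNat ≤ 122) ∨ (65 ≤ c.toNat ∧ c.toNat ≤ 90) ∨ (48 ≤ c.toNat ∧ c.toNat ≤ 57)) := by
  simp only [PySem.Chars.isalnum, PySem.Chars.isalpha, PySem.Chars.isdigit,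
    PySem.Chars.isupper, PySem.Chars.islower, Char.le_def, UInt32.le_iff_toNat_le,
    Bool.or_eq_true, Bool.and_eq_true, decide_eq_true_eq]
  show ((65 ≤ c.toNat ∧ c.toNat ≤ 90) ∨ (97 ≤ c.toNat ∧ c.toNat ≤ 122)) ∨ (48 ≤ c.toNat ∧ c.toNat ≤ 57) ↔ _
  tauto

theorem pvFW_char (c : Char) :
    (if 97 ≤ c.toNat ∧ c.toNat ≤ 122 then Char.ofNat (c.toNat - 97 + 0xFF41)
     else if 65 ≤ c.toNat ∧ c.toNat ≤ 90 then Char.ofNat (c.toNat - 65 + 0xFF21)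
     else if 48 ≤ c.toNat ∧ c.toNat ≤ 57 then Char.ofNat (c.toNat - 48 + 0xFF10)
     else c)
    = (if PySem.Chars.isalnum c then Char.ofNat (c.toNat + 0xFEE0) else c) := by
  by_cases h1 : 97 ≤ c.toNat ∧ c.toNat ≤ 122
  · rw [if_pos h1, if_pos (by rw [alnum_iff]; exact Or.inl h1)]
    congr 1; omega
  by_cases h2 : 65 ≤ c.toNat ∧ c.toNat ≤ 90
  · rw [if_neg h1, if_pos h2, if_pos (by rw [alnum_iff]; exact Or.inr (Or.inl h2))]
    congr 1; omega
  by_cases h3 : 48 ≤ c.toNat ∧ c.toNat ≤ 57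
  · rw [if_neg h1, if_neg h2, if_pos h3, if_pos (by rw [alnum_iff]; exact Or.inr (Or.inr h3))]
    congr 1; omega
  · rw [if_neg h1, if_neg h2, if_neg h3, if_neg (by rw [alnum_iff]; tauto)]

theorem pvFold_eq (l : List Char) (acc : List Char) :
    l.foldl (fun acc char =>
      if 97 ≤ char.toNat ∧ char.toNat ≤ 122 then acc ++ [Char.ofNat (char.toNat - 97 + 0xFF41)]
      else if 65 ≤ char.toNat ∧ char.toNat ≤ 90 then acc ++ [Char.ofNat (char.toNat - 65 + 0xFF21)]
      else if 48 ≤ char.toNat ∧ char.toNat ≤ 57 then acc ++ [Char.ofNat (char.toNat - 48 + 0xFF10)]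
      else acc ++ [char]) acc
    = acc ++ l.map (fun c => if PySem.Chars.isalnum c then Char.ofNat (c.toNat + 0xFEE0) else c) := by
  induction l generalizing acc with
  | nil => simp
  | cons c rest ih =>
    simp only [List.foldl_cons, List.map_cons]
    rw [ih]
    have hstep : (if 97 ≤ c.toNat ∧ c.toNat ≤ 122 then acc ++ [Char.ofNat (c.toNat - 97 + 0xFF41)]
      else if 65 ≤ c.toNat ∧ c.toNat ≤ 90 then acc ++ [Char.ofNat (c.toNat - 65 + 0xFF21)]
      else if 48 ≤ c.toNat ∧ c.toNat ≤ 57 then acc ++ [Char.ofNat (c.toNat - 48 + 0xFF10)]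
      else acc ++ [c])
      = acc ++ [if PySem.Chars.isalnum c then Char.ofNat (c.toNat + 0xFEE0) else c] := by
      rw [← pvFW_char c]; split_ifs <;> rfl
    rw [hstep, List.append_assoc, List.singleton_append]

theorem pvGroup_char (n : Nat) (h : n < 65536) :
    '\\' :: 'u' :: (pvByteHex (n / 256) ++ pvByteHex (n % 256)) = pvU4 n := by
  unfold pvByteHex pvU4
  have h1 : n / 256 / 16 = n / 4096 % 16 := by omega
  have h2 : n / 256 % 16 = n / 256 % 16 := rfl
  have h3 : n % 256 / 16 = n / 16 % 16 := by omega
  have h4 : n % 256 % 16 = n % 16 := by omega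
  simp [h1, h3, h4]

theorem pvEsc_eq (l : List Char) (hd : l.all pvDomChar = true) :
    ((pvHexGroups (pvBytesUtf16be l)).map (fun g => '\\' :: 'u' :: g)).flatten
    = (l.map (fun c => pvU4 c.toNat)).flatten := by
  induction l with
  | nil => rfl
  | cons c rest ih =>
    simp only [List.all_cons, Bool.and_eq_true] at hd
    have hc : c.toNat < 65536 := by
      have := hd.1
      unfold pvDomChar at this
      simp only [Bool.or_eq_true, Bool.and_eq_true, decide_eq_true_eq, beq_iff_eq] at this
      omega
    simp only [pvBytesUtf16be, List.flatMap_cons, List.cons_append, List.nil_append]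
    show ((pvHexGroups (c.toNat / 256 :: c.toNat % 256 :: pvBytesUtf16be rest)).map _).flatten = _
    rw [pvHexGroups]
    simp only [List.map_cons, List.flatten_cons]
    rw [ih hd.2, pvGroup_char c.toNat hc]

-- ===== VERDICT (by name: the statement is the Claim_ definition above) =====
theorem unicode_variants_py_spec : Claim_equal_unicode_variants_py := by
  intro payload hdom
  unfold Spec_unicode_variants_py unicode_variants_py unicode_variants_py_alt
  simp only [List.cons.injEq, and_true]
  exact ⟨congrArg String.ofList (pvFold_eq payload.toList []),
         congrArg String.ofList (pvEsc_eq payload.toList hdom).symm⟩
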